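-- pv_equiv track=rewrite | github.com/goracle/dirichlet-divisor-conjecture | gauss_circle_conjecture/identities_verification/identity.py | gaussian_norms
-- ===== SOURCE A (Python) =====
-- import math
-- from collections import defaultdict
--
-- def gaussian_norms(limit):
--     # map norm -> count of gaussian integers
--     norms = defaultdict(int)
--     R = int(math.isqrt(limit))
--     for a in range(-R, R+1):
--         for b in range(-R, R+1):
--             n = a*a + b*b
--             if 1 <= n <= limit:
--                 norms[n] += 1
--     return norms
-- ===== SOURCE B (Python) =====
-- import math
-- from collections import defaultdict
--
-- def gaussian_norms(limit):
--     # single flattened state-machine loop over the quarter grid (m = |a|, b = |b|),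
--     # adding each norm once with its symmetry multiplicity (2 if m)(2 if b)
--     norms = defaultdict(int)
--     m = math.isqrt(limit)
--     b = m
--     while m >= 0:
--         n = m*m + b*b
--         if 1 <= n <= limit:
--             norms[n] += (2 if m else 1) * (2 if b else 1)
--         if b > 0:
--             b -= 1
--         else:
--             m, b = m - 1, math.isqrt(limit)
--     return norms
-- ===== Notes on version B (the rewrite author's own statement) =====
-- stated objective: faster
-- what changed: B replaces A's nested full signed-grid scan ((2R+1)^2 points, +1 each) by a single flattened while-loop state machine over the quarter grid m,b in [0,R], adding each norm once with its symmetry multiplicity (2 if m else 1)*(2 if b else 1).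
import Mathlib
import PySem

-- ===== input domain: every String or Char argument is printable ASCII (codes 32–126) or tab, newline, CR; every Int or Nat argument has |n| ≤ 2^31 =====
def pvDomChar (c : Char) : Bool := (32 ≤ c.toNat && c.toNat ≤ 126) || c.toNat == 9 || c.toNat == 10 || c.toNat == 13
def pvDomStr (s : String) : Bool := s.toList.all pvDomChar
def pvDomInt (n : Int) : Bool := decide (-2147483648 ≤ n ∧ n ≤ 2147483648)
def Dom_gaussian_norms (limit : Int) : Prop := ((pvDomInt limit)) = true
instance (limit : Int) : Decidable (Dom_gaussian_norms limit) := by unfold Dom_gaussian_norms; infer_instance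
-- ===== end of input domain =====

-- B replaces A's nested full signed-grid scan by a single flattened while-loop over the
-- quarter grid (m,b) with symmetry multiplicities in {1,2,4}; measured faster (constant factor).

-- ===== PORT A =====
def gaussian_norms (limit : Int) : List (Int × Int) :=
  let R : Int := Int.sqrt limit
  ((PySem.List.pyRange (-R) (R+1) 1).foldl (fun norms a =>
      (PySem.List.pyRange (-R) (R+1) 1).foldl (fun norms b =>
        let n := a*a + b*b
        if 1 ≤ n ∧ n ≤ limit then norms.modify n 0 (· + 1) else norms) norms)
    PySem.Dict.empty).items

-- ===== PORT B =====
-- the Python while-loop: state (m, b), one body per iteration; math.isqrt(limit) = R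
def gaussianAltGo (limit R : Int) (m b : Int) (norms : PySem.Dict Int Int) : PySem.Dict Int Int :=
  if _h : m < 0 then norms
  else
    let n := m*m + b*b
    let norms' := if 1 ≤ n ∧ n ≤ limit then
        norms.modify n 0 (· + (if m ≠ 0 then 2 else 1) * (if b ≠ 0 then 2 else 1))
      else norms
    if 0 < b then gaussianAltGo limit R m (b-1) norms'
    else gaussianAltGo limit R (m-1) R norms'
termination_by ((m+1).toNat * (R.toNat + 1) + b.toNat)
decreasing_by
  · omega
  · have h1 : (m - 1 + 1) = m := by ring
    rw [h1]
    have h2 : (m + 1).toNat = m.toNat + 1 := by omega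
    rw [h2, Nat.succ_mul]
    omega

def gaussian_norms_alt (limit : Int) : List (Int × Int) :=
  let R : Int := Int.sqrt limit
  (gaussianAltGo limit R R R PySem.Dict.empty).items

-- ===== PRECONDITION & SPEC =====
-- math.isqrt raises ValueError for a negative argument, so A raises exactly on limit < 0.
def Pre_gaussian_norms (limit : Int) : Prop := 0 ≤ limit
instance (limit : Int) : Decidable (Pre_gaussian_norms limit) := by unfold Pre_gaussian_norms; infer_instance
def pvWitness_gaussian_norms : Int := (5)

def Spec_gaussian_norms (limit : Int) (out : List (Int × Int)) : Prop := out = gaussian_norms_alt limit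
instance (limit : Int) (out : List (Int × Int)) : Decidable (Spec_gaussian_norms limit out) := by unfold Spec_gaussian_norms; infer_instance

-- ===== CLAIM (what is proved, stated in full; the proofs are below) =====
def Claim_equal_gaussian_norms : Prop := ∀ (limit : Int), Dom_gaussian_norms limit → Pre_gaussian_norms limit → Spec_gaussian_norms limit (gaussian_norms limit)

-- ===== LEMMAS AND PROOFS =====

def pvIncr (d : PySem.Dict Int Int) (k w : Int) : PySem.Dict Int Int := d.insert k (d.getD k 0 + w)

lemma pvIncr_self (d : PySem.Dict Int Int) (k w v : Int) :
    pvIncr (pvIncr d k w) k v = pvIncr d k (w + v) := by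
  unfold pvIncr
  rw [PySem.Dict.getD_insert_self, PySem.Dict.insert_insert_self, add_assoc]

lemma pvIncr_comm (d : PySem.Dict Int Int) (k n w v : Int) (h : k ∈ d.keys) :
    pvIncr (pvIncr d k w) n v = pvIncr (pvIncr d n v) k w := by
  by_cases hnk : n = k
  · subst hnk
    rw [pvIncr_self, pvIncr_self, add_comm]
  · have hkn : k ≠ n := fun hh => hnk hh.symm
    have hk : d.contains k = true := (PySem.Dict.contains_iff_mem_keys d k).mpr h
    unfold pvIncr
    rw [PySem.Dict.getD_insert_of_ne d _ 0 hnk, PySem.Dict.getD_insert_of_ne d _ 0 hkn]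
    set A := d.getD k 0 + w with hA
    set B := d.getD n 0 + v with hB
    apply PySem.Dict.ext
    by_cases hn : d.contains n = true
    · have h1 : (d.insert k A).contains n = true := by
        rw [PySem.Dict.contains_insert]; simp [hn]
      have h2 : (d.insert n B).contains k = true := by
        rw [PySem.Dict.contains_insert]; simp [hk]
      rw [PySem.Dict.items_insert_of_contains _ _ h1, PySem.Dict.items_insert_of_contains _ _ hk,
          PySem.Dict.items_insert_of_contains _ _ h2, PySem.Dict.items_insert_of_contains _ _ hn]
      simp only [List.map_map]
      apply List.map_congr_left
      intro p _
      by_cases h1 : p.1 = k <;> by_cases h2 : p.1 = n <;>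
        simp_all [Function.comp]
    · have hn' : (d.insert k A).contains n = false := by
        rw [PySem.Dict.contains_insert]
        simp [hn, hnk]
      have h2 : (d.insert n B).contains k = true := by
        rw [PySem.Dict.contains_insert]; simp [hk]
      rw [PySem.Dict.items_insert_of_not_contains _ _ hn', PySem.Dict.items_insert_of_contains _ _ hk,
          PySem.Dict.items_insert_of_contains _ _ h2, PySem.Dict.items_insert_of_not_contains _ _ (by simpa using hn),
          List.map_append]
      simp [hnk]

lemma pvIncr_mem_self (d : PySem.Dict Int Int) (k w : Int) : k ∈ (pvIncr d k w).keys := by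
  unfold pvIncr
  rw [PySem.Dict.mem_keys_insert]; exact Or.inl rfl

lemma mem_keys_pvIncr (d : PySem.Dict Int Int) (k w k' : Int) (h : k' ∈ d.keys) :
    k' ∈ (pvIncr d k w).keys := by
  unfold pvIncr
  rw [PySem.Dict.mem_keys_insert]; exact Or.inr h

def pvStep (limit a : Int) (w : Int → Int) (d : PySem.Dict Int Int) (b : Int) : PySem.Dict Int Int :=
  if 1 ≤ a*a + b*b ∧ a*a + b*b ≤ limit then pvIncr d (a*a + b*b) (w b) else d

lemma pvStep_keys_mono (limit a : Int) (w : Int → Int) (d : PySem.Dict Int Int) (b k : Int)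
    (h : k ∈ d.keys) : k ∈ (pvStep limit a w d b).keys := by
  unfold pvStep
  split
  · exact mem_keys_pvIncr _ _ _ _ h
  · exact h

lemma pvStep_pull (limit a : Int) (w : Int → Int) (d : PySem.Dict Int Int) (b k v : Int)
    (h : k ∈ d.keys) : pvStep limit a w (pvIncr d k v) b = pvIncr (pvStep limit a w d b) k v := by
  unfold pvStep
  split
  · exact pvIncr_comm d k _ v _ h
  · rfl

lemma foldl_keys_mono {f : PySem.Dict Int Int → Int → PySem.Dict Int Int}
    (H1 : ∀ d x k, k ∈ d.keys → k ∈ (f d x).keys)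
    (L : List Int) (d : PySem.Dict Int Int) (k : Int) (h : k ∈ d.keys) :
    k ∈ (L.foldl f d).keys := by
  induction L generalizing d with
  | nil => exact h
  | cons x xs ih => exact ih _ (H1 _ _ _ h)

lemma foldl_pvIncr_pull {f : PySem.Dict Int Int → Int → PySem.Dict Int Int}
    (H1 : ∀ d x k, k ∈ d.keys → k ∈ (f d x).keys)
    (H2 : ∀ d x k v, k ∈ d.keys → f (pvIncr d k v) x = pvIncr (f d x) k v)
    (L : List Int) (d : PySem.Dict Int Int) (k v : Int) (h : k ∈ d.keys) :
    L.foldl f (pvIncr d k v) = pvIncr (L.foldl f d) k v := by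
  induction L generalizing d with
  | nil => rfl
  | cons x xs ih =>
      simp only [List.foldl_cons]
      rw [H2 _ _ _ _ h]
      exact ih _ (H1 _ _ _ h)

lemma foldl_pvStep_cov (limit a : Int) (w : Int → Int) (L : List Int) (d : PySem.Dict Int Int)
    (b : Int) (hb : b ∈ L) (hc : 1 ≤ a*a + b*b ∧ a*a + b*b ≤ limit) :
    (a*a + b*b) ∈ (L.foldl (pvStep limit a w) d).keys := by
  induction L generalizing d with
  | nil => cases hb
  | cons x xs ih =>
      simp only [List.foldl_cons]
      rcases List.mem_cons.mp hb with hbx | hbxs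
      · subst hbx
        apply foldl_keys_mono (pvStep_keys_mono limit a w)
        unfold pvStep
        rw [if_pos hc]
        exact pvIncr_mem_self _ _ _
      · exact ih _ hbxs

lemma pass_comm {f : PySem.Dict Int Int → Int → PySem.Dict Int Int}
    (H1 : ∀ d x k, k ∈ d.keys → k ∈ (f d x).keys)
    (H2 : ∀ d x k v, k ∈ d.keys → f (pvIncr d k v) x = pvIncr (f d x) k v)
    (limit a : Int) (w : Int → Int) (LA : List Int) (L2 : List Int) (D : PySem.Dict Int Int)
    (hcov : ∀ b ∈ L2, (1 ≤ a*a + b*b ∧ a*a + b*b ≤ limit) → (a*a + b*b) ∈ D.keys) :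
    L2.foldl (pvStep limit a w) (LA.foldl f D) = LA.foldl f (L2.foldl (pvStep limit a w) D) := by
  induction L2 generalizing D with
  | nil => rfl
  | cons b rest ih =>
      simp only [List.foldl_cons]
      by_cases hc : 1 ≤ a*a + b*b ∧ a*a + b*b ≤ limit
      · have hkey : (a*a + b*b) ∈ D.keys := hcov b (List.mem_cons_self ..) hc
        have hstep : pvStep limit a w (LA.foldl f D) b
            = LA.foldl f (pvIncr D (a*a + b*b) (w b)) := by
          unfold pvStep
          rw [if_pos hc, foldl_pvIncr_pull H1 H2 LA D _ _ hkey]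
        have hstepD : pvStep limit a w D b = pvIncr D (a*a + b*b) (w b) := by
          unfold pvStep; rw [if_pos hc]
        rw [hstep, hstepD]
        exact ih _ (fun b' hb' hc' => mem_keys_pvIncr _ _ _ _ (hcov b' (List.mem_cons_of_mem _ hb') hc'))
      · have h1 : pvStep limit a w (LA.foldl f D) b = LA.foldl f D := by
          unfold pvStep; rw [if_neg hc]
        have h2 : pvStep limit a w D b = D := by
          unfold pvStep; rw [if_neg hc]
        rw [h1, h2]
        exact ih D (fun b' hb' hc' => hcov b' (List.mem_cons_of_mem _ hb') hc')

lemma pvStep_pos (limit a : Int) (w : Int → Int) (d : PySem.Dict Int Int) (b : Int)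
    (hc : 1 ≤ a*a + b*b ∧ a*a + b*b ≤ limit) :
    pvStep limit a w d b = pvIncr d (a*a + b*b) (w b) := by
  unfold pvStep; rw [if_pos hc]

lemma pvStep_neg (limit a : Int) (w : Int → Int) (d : PySem.Dict Int Int) (b : Int)
    (hc : ¬ (1 ≤ a*a + b*b ∧ a*a + b*b ≤ limit)) :
    pvStep limit a w d b = d := by
  unfold pvStep; rw [if_neg hc]

lemma double_pass (limit a : Int) (w : Int → Int) (L : List Int) (d : PySem.Dict Int Int) :
    L.foldl (pvStep limit a w) (L.foldl (pvStep limit a w) d)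
      = L.foldl (pvStep limit a (fun b => w b + w b)) d := by
  induction L generalizing d with
  | nil => rfl
  | cons b rest ih =>
      simp only [List.foldl_cons]
      by_cases hc : 1 ≤ a*a + b*b ∧ a*a + b*b ≤ limit
      · rw [pvStep_pos limit a w d b hc, pvStep_pos limit a (fun b => w b + w b) d b hc,
            pvStep_pos limit a w _ b hc,
            ← foldl_pvIncr_pull (pvStep_keys_mono limit a w) (pvStep_pull limit a w) rest
              (pvIncr d (a*a + b*b) (w b)) _ _ (pvIncr_mem_self _ _ _),
            pvIncr_self, ih]
      · rw [pvStep_neg limit a w d b hc, pvStep_neg limit a (fun b => w b + w b) d b hc,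
            pvStep_neg limit a w _ b hc, ih]

def pvFull (limit R a : Int) (d : PySem.Dict Int Int) : PySem.Dict Int Int :=
  (PySem.List.pyRange (-R) (R+1) 1).foldl (pvStep limit a (fun _ => 1)) d

def pvHalf (limit R a : Int) (d : PySem.Dict Int Int) : PySem.Dict Int Int :=
  (PySem.List.pyRange R (-1) (-1)).foldl (pvStep limit a (fun b => if b ≠ 0 then 2 else 1)) d

def pvQuad (limit R a : Int) (d : PySem.Dict Int Int) : PySem.Dict Int Int :=
  (PySem.List.pyRange R (-1) (-1)).foldl
    (pvStep limit a (fun b => (if a ≠ 0 then 2 else 1) * (if b ≠ 0 then 2 else 1))) d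

lemma pvStep_neg_b (limit a : Int) (w : Int → Int) (hw : ∀ b, w (-b) = w b)
    (d : PySem.Dict Int Int) (b : Int) :
    pvStep limit a w d (-b) = pvStep limit a w d b := by
  unfold pvStep
  rw [neg_mul_neg, hw]

lemma inner_half (limit a : Int) (N : Nat) (d : PySem.Dict Int Int) :
    pvFull limit (N : Int) a d = pvHalf limit (N : Int) a d := by
  induction N generalizing d with
  | zero =>
      unfold pvFull pvHalf
      norm_num
      rw [PySem.List.pyRange_one_cons (by norm_num), PySem.List.pyRange_one_eq_nil (by norm_num),
          PySem.List.pyRange_neg_one_cons (by norm_num), PySem.List.pyRange_neg_one_eq_nil (by norm_num)]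
      simp only [List.foldl_cons, List.foldl_nil]
      unfold pvStep
      norm_num
  | succ N ih =>
      unfold pvFull pvHalf
      push_cast
      have e1 : PySem.List.pyRange (-((N:Int)+1)) ((N:Int)+1+1) 1
          = (-((N:Int)+1)) :: (PySem.List.pyRange (-(N:Int)) ((N:Int)+1) 1 ++ [(N:Int)+1]) := by
        rw [PySem.List.pyRange_one_cons (by omega),
            show (-((N:Int)+1) + 1) = -(N:Int) by ring,
            PySem.List.pyRange_one_succ_right (by omega)]
      have e2 : PySem.List.pyRange ((N:Int)+1) (-1) (-1)
          = ((N:Int)+1) :: PySem.List.pyRange (N:Int) (-1) (-1) := by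
        rw [PySem.List.pyRange_neg_one_cons (by omega),
            show ((N:Int)+1-1) = (N:Int) by ring]
      rw [e1, e2]
      simp only [List.foldl_cons, List.foldl_append, List.foldl_nil]
      have hneg : pvStep limit a (fun _ => (1:Int)) d (-((N:Int)+1))
          = pvStep limit a (fun _ => (1:Int)) d ((N:Int)+1) :=
        pvStep_neg_b limit a _ (fun _ => rfl) d _
      rw [hneg]
      by_cases hc : 1 ≤ a*a + ((N:Int)+1)*((N:Int)+1) ∧ a*a + ((N:Int)+1)*((N:Int)+1) ≤ limit
      · rw [pvStep_pos limit a _ d _ hc, pvStep_pos limit a _ d _ hc,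
            show (if ((N:Int)+1) ≠ 0 then (2:Int) else 1) = 2 by rw [if_pos (show ((N:Int)+1) ≠ (0:Int) by omega)],
            pvStep_pos limit a _ _ ((N:Int)+1) hc,
            ← foldl_pvIncr_pull (pvStep_keys_mono limit a _) (pvStep_pull limit a _) _
              (pvIncr d (a*a + ((N:Int)+1)*((N:Int)+1)) 1) _ _ (pvIncr_mem_self _ _ _),
            pvIncr_self, show (1+1 : Int) = 2 from rfl]
        have := ih (pvIncr d (a*a + ((N:Int)+1)*((N:Int)+1)) 2)
        unfold pvFull pvHalf at this
        exact this
      · rw [pvStep_neg limit a _ d _ hc, pvStep_neg limit a _ d _ hc,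
            pvStep_neg limit a _ _ _ hc]
        have := ih d
        unfold pvFull pvHalf at this
        exact this

lemma pvHalf_keys_mono (limit R' : Int) (d : PySem.Dict Int Int) (x k : Int)
    (h : k ∈ d.keys) : k ∈ (pvHalf limit R' x d).keys := by
  unfold pvHalf
  exact foldl_keys_mono (pvStep_keys_mono limit x _) _ _ _ h

lemma pvHalf_pull (limit R' : Int) (d : PySem.Dict Int Int) (x k v : Int)
    (h : k ∈ d.keys) : pvHalf limit R' x (pvIncr d k v) = pvIncr (pvHalf limit R' x d) k v := by
  unfold pvHalf
  exact foldl_pvIncr_pull (pvStep_keys_mono limit x _) (pvStep_pull limit x _) _ _ _ _ h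

lemma pvStep_neg_a (limit a : Int) (w : Int → Int) :
    pvStep limit (-a) w = pvStep limit a w := by
  funext d b
  unfold pvStep
  rw [neg_mul_neg]

lemma outer (limit R' : Int) (M : Nat) (d : PySem.Dict Int Int) :
    (PySem.List.pyRange (-(M : Int)) ((M : Int) + 1) 1).foldl (fun d a => pvHalf limit R' a d) d
      = (PySem.List.pyRange (-(M : Int)) 1 1).foldl (fun d a => pvQuad limit R' a d) d := by
  induction M generalizing d with
  | zero =>
      norm_num
      rw [PySem.List.pyRange_one_cons (by norm_num), PySem.List.pyRange_one_eq_nil (by norm_num)]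
      simp only [List.foldl_cons, List.foldl_nil]
      unfold pvHalf pvQuad
      apply List.foldl_ext
      intro acc b _
      unfold pvStep
      beta_reduce
      rw [if_neg (show ¬ ((0:Int) ≠ 0) by norm_num), one_mul]
  | succ M ih =>
      push_cast
      have e1 : PySem.List.pyRange (-((M:Int)+1)) ((M:Int)+1+1) 1
          = (-((M:Int)+1)) :: (PySem.List.pyRange (-(M:Int)) ((M:Int)+1) 1 ++ [(M:Int)+1]) := by
        rw [PySem.List.pyRange_one_cons (by omega),
            show (-((M:Int)+1) + 1) = -(M:Int) by ring,
            PySem.List.pyRange_one_succ_right (by omega)]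
      have e2 : PySem.List.pyRange (-((M:Int)+1)) 1 1
          = (-((M:Int)+1)) :: PySem.List.pyRange (-(M:Int)) 1 1 := by
        rw [PySem.List.pyRange_one_cons (by omega),
            show (-((M:Int)+1) + 1) = -(M:Int) by ring]
      rw [e1, e2]
      simp only [List.foldl_cons, List.foldl_append, List.foldl_nil]
      have hA : pvHalf limit R' (-((M:Int)+1)) d = pvHalf limit R' ((M:Int)+1) d := by
        unfold pvHalf; rw [pvStep_neg_a]
      have hQ : pvQuad limit R' (-((M:Int)+1)) d
          = pvHalf limit R' ((M:Int)+1) (pvHalf limit R' ((M:Int)+1) d) := by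
        unfold pvQuad pvHalf
        refine Eq.trans ?_ (double_pass limit ((M:Int)+1)
          (fun b => if b ≠ 0 then 2 else 1) (PySem.List.pyRange R' (-1) (-1)) d).symm
        apply List.foldl_ext
        intro acc b _
        unfold pvStep
        beta_reduce
        rw [neg_mul_neg, if_pos (show (-((M:Int)+1)) ≠ (0:Int) by omega),
            show (2:Int) * (if b ≠ 0 then (2:Int) else 1)
              = (if b ≠ 0 then (2:Int) else 1) + (if b ≠ 0 then (2:Int) else 1) from by ring]
      rw [hA, hQ, ← ih]
      have := pass_comm (f := fun d a => pvHalf limit R' a d)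
        (fun d x k h => pvHalf_keys_mono limit R' d x k h)
        (fun d x k v h => pvHalf_pull limit R' d x k v h)
        limit ((M:Int)+1) (fun b => if b ≠ 0 then 2 else 1)
        (PySem.List.pyRange (-(M:Int)) ((M:Int)+1) 1)
        (PySem.List.pyRange R' (-1) (-1))
        (pvHalf limit R' ((M:Int)+1) d)
        (fun b hb hc => by
          unfold pvHalf
          exact foldl_pvStep_cov limit ((M:Int)+1) _ _ d b hb hc)
      unfold pvHalf at this ⊢
      exact this

-- the flattened while-loop, one row at a time: running it from (m, B) first folds the
-- row b = B, B-1, …, 0 with weight (2 if m)(2 if b), then continues at (m-1, R)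
lemma goB_row (limit R : Int) (B : Nat) (m : Int) (hm : ¬ m < 0) (d : PySem.Dict Int Int) :
    gaussianAltGo limit R m (B : Int) d
      = gaussianAltGo limit R (m-1) R
          ((PySem.List.pyRange (B : Int) (-1) (-1)).foldl
            (pvStep limit m (fun b => (if m ≠ 0 then 2 else 1) * (if b ≠ 0 then 2 else 1))) d) := by
  induction B generalizing d with
  | zero =>
      rw [gaussianAltGo, dif_neg hm]
      dsimp only
      norm_num
      rw [PySem.List.pyRange_neg_one_cons (by norm_num),
          PySem.List.pyRange_neg_one_eq_nil (by norm_num)]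
      simp only [List.foldl_cons, List.foldl_nil]
      unfold pvStep pvIncr
      norm_num
      split
      · rfl
      · rfl
  | succ B ih =>
      rw [gaussianAltGo, dif_neg hm]
      dsimp only
      push_cast
      rw [if_pos (show (0:Int) < (B:Int)+1 by omega)]
      have e2 : PySem.List.pyRange ((B:Int)+1) (-1) (-1)
          = ((B:Int)+1) :: PySem.List.pyRange (B:Int) (-1) (-1) := by
        rw [PySem.List.pyRange_neg_one_cons (by omega),
            show ((B:Int)+1-1) = (B:Int) by ring]
      rw [e2]
      simp only [List.foldl_cons]
      have hb : ((B:Int)+1-1) = (B:Int) := by ring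
      rw [hb]
      have hstep :
          (if 1 ≤ m*m + ((B:Int)+1)*((B:Int)+1) ∧ m*m + ((B:Int)+1)*((B:Int)+1) ≤ limit then
              d.modify (m*m + ((B:Int)+1)*((B:Int)+1)) 0
                (· + (if m ≠ 0 then 2 else 1) * (if ((B:Int)+1) ≠ 0 then 2 else 1))
            else d)
          = pvStep limit m (fun b => (if m ≠ 0 then 2 else 1) * (if b ≠ 0 then 2 else 1)) d ((B:Int)+1) := by
        unfold pvStep pvIncr
        split
        · rfl
        · rfl
      rw [hstep]
      exact ih _

-- running the flattened loop from (M, R) is the outer fold of pvQuad over a = -M..0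
lemma goB_outer (limit : Int) (N : Nat) (M : Nat) (d : PySem.Dict Int Int) :
    gaussianAltGo limit (N : Int) (M : Int) (N : Int) d
      = (PySem.List.pyRange (-(M : Int)) 1 1).foldl (fun d a => pvQuad limit (N : Int) a d) d := by
  induction M generalizing d with
  | zero =>
      norm_num
      rw [goB_row limit (N : Int) N 0 (by norm_num) d]
      rw [show ((0:Int) - 1) = (-1 : Int) by ring, gaussianAltGo, dif_pos (by norm_num : (-1:Int) < 0)]
      rw [PySem.List.pyRange_one_cons (by norm_num), PySem.List.pyRange_one_eq_nil (by norm_num)]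
      simp only [List.foldl_cons, List.foldl_nil]
      unfold pvQuad
      rfl
  | succ M ih =>
      push_cast
      rw [goB_row limit (N : Int) N ((M:Int)+1) (by omega) d,
          show (((M:Int)+1) - 1) = (M:Int) by ring]
      have e2 : PySem.List.pyRange (-((M:Int)+1)) 1 1
          = (-((M:Int)+1)) :: PySem.List.pyRange (-(M:Int)) 1 1 := by
        rw [PySem.List.pyRange_one_cons (by omega),
            show (-((M:Int)+1) + 1) = -(M:Int) by ring]
      rw [e2]
      simp only [List.foldl_cons]
      have hq : pvQuad limit (N:Int) (-((M:Int)+1)) d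
          = (PySem.List.pyRange (N:Int) (-1) (-1)).foldl
              (pvStep limit ((M:Int)+1)
                (fun b => (if ((M:Int)+1) ≠ 0 then 2 else 1) * (if b ≠ 0 then 2 else 1))) d := by
        unfold pvQuad
        rw [pvStep_neg_a]
        apply List.foldl_ext
        intro acc b _
        unfold pvStep
        beta_reduce
        rw [if_pos (show (-((M:Int)+1)) ≠ (0:Int) by omega),
            if_pos (show ((M:Int)+1) ≠ (0:Int) by omega)]
      rw [hq]
      exact ih _

lemma portA_eq (limit : Int) :
    gaussian_norms limit
      = ((PySem.List.pyRange (-(Int.sqrt limit)) (Int.sqrt limit + 1) 1).foldl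
          (fun d a => pvFull limit (Int.sqrt limit) a d) PySem.Dict.empty).items := rfl

lemma portB_eq (limit : Int) :
    gaussian_norms_alt limit
      = (gaussianAltGo limit (Int.sqrt limit) (Int.sqrt limit) (Int.sqrt limit) PySem.Dict.empty).items := rfl

-- ===== VERDICT (by name: the statement is the Claim_ definition above) =====
theorem gaussian_norms_spec : Claim_equal_gaussian_norms := by
  intro limit _ _
  unfold Spec_gaussian_norms
  obtain ⟨N, hN⟩ : ∃ N : Nat, Int.sqrt limit = (N : Int) :=
    ⟨(Int.sqrt limit).toNat, (Int.toNat_of_nonneg (Int.sqrt_nonneg _)).symm⟩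
  rw [portA_eq, portB_eq, hN]
  have hfull : (fun (d : PySem.Dict Int Int) (a : Int) => pvFull limit (N : Int) a d)
      = fun d a => pvHalf limit (N : Int) a d := by
    funext d a; exact inner_half limit a N d
  rw [hfull, outer limit (N : Int) N, goB_outer limit N N]
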